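-- pv_equiv track=rewrite | github.com/MrBrantCode/unitest_baseline | mut_generate/mist_train_cf/cf_65016/solution.py | cubed_dict
-- ===== SOURCE A (Python) =====
-- def cubed_dict(seq, i=0, res=None):
--     if res is None:
--         res = {}
--     if i == len(seq):
--         return res
--     else:
--         res[seq[i]] = seq[i]**3
--         return cubed_dict(seq, i+1, res=res)
-- ===== SOURCE B (Python) =====
-- def cubed_dict(seq, i=0, res=None):
--     if res is None:
--         res = {}
--     for j in range(i, len(seq)):
--         res[seq[j]] = seq[j] ** 3
--     return res
-- ===== Notes on version B (the rewrite author's own statement) =====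
-- stated objective: idiomatic
-- what changed: Replaced the tail recursion (one Python call frame per element, rebinding i and threading res through keyword recursion) by a single explicit for-loop over range(i, len(seq)) that mutates res in place.
import Mathlib
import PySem

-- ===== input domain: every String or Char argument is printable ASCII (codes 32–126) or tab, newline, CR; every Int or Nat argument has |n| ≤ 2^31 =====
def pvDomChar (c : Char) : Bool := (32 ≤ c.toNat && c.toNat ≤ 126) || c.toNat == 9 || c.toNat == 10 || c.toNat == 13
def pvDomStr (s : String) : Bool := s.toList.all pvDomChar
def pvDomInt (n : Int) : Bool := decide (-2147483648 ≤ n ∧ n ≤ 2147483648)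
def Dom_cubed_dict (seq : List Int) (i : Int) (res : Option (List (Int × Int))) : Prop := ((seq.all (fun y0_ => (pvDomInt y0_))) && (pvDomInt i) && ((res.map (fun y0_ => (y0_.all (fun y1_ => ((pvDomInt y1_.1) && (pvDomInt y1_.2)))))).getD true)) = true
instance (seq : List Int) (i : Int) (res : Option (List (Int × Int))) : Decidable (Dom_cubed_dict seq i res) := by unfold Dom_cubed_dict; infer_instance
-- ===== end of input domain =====

-- B replaces A's tail recursion by an explicit in-place loop over range(i, len(seq)) (idiomatic; same cost).
-- A mutates the caller-supplied res dict in place; B performs the same mutation — the theorems are about the return value.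

-- ===== PORT A =====
-- recursion 'cubed_dict(seq, i+1, res)' ported with fuel (len(seq) - i) as a pure totality device;
-- where Python raises IndexError (pyGet? = none, or i > len so fuel runs out before i == len) the
-- port returns the dict so far — those inputs are excluded by Pre_cubed_dict.
def cubedGoA (seq : List Int) (i : Int) (d : PySem.Dict Int Int) : Nat → PySem.Dict Int Int
  | 0 => d
  | Nat.succ fuel =>
    if i = (seq.length : Int) then d
    else
      match PySem.List.pyGet? seq i with
      | none => d
      | some v => cubedGoA seq (i + 1) (d.insert v (v ^ 3)) fuel

def cubed_dict (seq : List Int) (i : Int) (res : Option (List (Int × Int))) : List (Int × Int) :=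
  (cubedGoA seq i (PySem.Dict.mk (res.getD [])) ((seq.length - i).toNat)).items

-- ===== PORT B =====
def cubed_dict_alt (seq : List Int) (i : Int) (res : Option (List (Int × Int))) : List (Int × Int) :=
  ((PySem.List.pyRange i (seq.length : Int) 1).foldl
    (fun d j =>
      match PySem.List.pyGet? seq j with
      | none => d
      | some v => d.insert v (v ^ 3))
    (PySem.Dict.mk (res.getD []))).items

-- ===== PRECONDITION & SPEC =====
-- Pre_ excludes (a) indices outside [-len(seq), len(seq)], on which A raises IndexError, and
-- (b) res association lists with duplicate keys, which do not represent any Python dict.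
def Pre_cubed_dict (seq : List Int) (i : Int) (res : Option (List (Int × Int))) : Prop :=
  -(seq.length : Int) ≤ i ∧ i ≤ (seq.length : Int) ∧ ((res.getD []).map Prod.fst).Nodup
instance (seq : List Int) (i : Int) (res : Option (List (Int × Int))) : Decidable (Pre_cubed_dict seq i res) := by unfold Pre_cubed_dict; infer_instance

def pvWitness_cubed_dict : List Int × Int × (Option (List (Int × Int))) := ([1, 2, -3], 0, some [(7, 7)])

def Spec_cubed_dict (seq : List Int) (i : Int) (res : Option (List (Int × Int))) (out : List (Int × Int)) : Prop := out = cubed_dict_alt seq i res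
instance (seq : List Int) (i : Int) (res : Option (List (Int × Int))) (out : List (Int × Int)) : Decidable (Spec_cubed_dict seq i res out) := by unfold Spec_cubed_dict; infer_instance

-- ===== CLAIM (what is proved, stated in full; the proofs are below) =====
def Claim_equal_cubed_dict : Prop := ∀ (seq : List Int) (i : Int) (res : Option (List (Int × Int))), Dom_cubed_dict seq i res → Pre_cubed_dict seq i res → Spec_cubed_dict seq i res (cubed_dict seq i res)

-- ===== LEMMAS AND PROOFS =====
-- The recursion of A, started with fuel (len - i), performs exactly the fold of B over range(i, len, 1):
-- both bodies are the same step on the same dict, in the same index order.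
theorem cubedGoA_eq_foldl (seq : List Int) :
    ∀ (fuel : Nat) (i : Int) (d : PySem.Dict Int Int), fuel = ((seq.length : Int) - i).toNat →
      -(seq.length : Int) ≤ i →
      cubedGoA seq i d fuel =
        (PySem.List.pyRange i (seq.length : Int) 1).foldl
          (fun d j =>
            match PySem.List.pyGet? seq j with
            | none => d
            | some v => d.insert v (v ^ 3)) d := by
  intro fuel
  induction fuel with
  | zero =>
    intro i d h _
    have hle : (seq.length : Int) ≤ i := by omega
    rw [PySem.List.pyRange_one i (seq.length : Int)]
    have : ((seq.length : Int) - i).toNat = 0 := by omega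
    simp [this, cubedGoA]
  | succ f ih =>
    intro i d h hlb
    have hlt : i < (seq.length : Int) := by omega
    rw [PySem.List.pyRange_one_cons hlt, List.foldl_cons]
    have hne : i ≠ (seq.length : Int) := by omega
    simp only [cubedGoA, if_neg hne]
    cases hg : PySem.List.pyGet? seq i with
    | none =>
      exact absurd ((PySem.List.pyGet?_eq_none_iff seq i).mp hg) (by simp [PySem.Raise.InRange]; omega)
    | some v => simpa using ih (i + 1) (d.insert v (v ^ 3)) (by omega) (by omega)

-- ===== VERDICT (by name: the statement is the Claim_ definition above) =====
theorem cubed_dict_spec : Claim_equal_cubed_dict := by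
  intro seq i res _ hpre
  unfold Spec_cubed_dict cubed_dict cubed_dict_alt
  rw [cubedGoA_eq_foldl seq _ i _ rfl hpre.1]
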